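-- pv_equiv track=rewrite | github.com/dawit-teklu-a2sv/competitive-programming | 0985-sum-of-even-numbers-after-queries/0985-sum-of-even-numbers-after-queries.py | sumEvenAfterQueries
-- ===== SOURCE A (Python) =====
-- from typing import List
--
-- def sumEvenAfterQueries(nums: List[int], queries: List[List[int]]) -> List[int]:
--     # first  calculate the sum of all even numbers
--     # then deduct the current number from the sum of evens
--     # after adding the query value check if the new added value is even if it's add it to the sum
--     # of evens and append it the output array
--     output = []
--     evenSum = sum([item for item in nums if item % 2 == 0])
--     for value,index in queries:
--         if nums[index] % 2 == 0:
--             evenSum -= nums[index]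
--         nums[index] += value
--         if nums[index] % 2 == 0:
--             evenSum += nums[index]
--         output.append(evenSum)
--     return output
-- ===== SOURCE B (Python) =====
-- from typing import List
--
-- def sumEvenAfterQueries(nums: List[int], queries: List[List[int]]) -> List[int]:
--     # Naive full-recompute: apply the update, then rescan nums for its even sum.
--     output = []
--     for value, index in queries:
--         nums[index] += value
--         output.append(sum(x for x in nums if x % 2 == 0))
--     return output
-- ===== Notes on version B (the rewrite author's own statement) =====
-- stated objective: simpler
-- what changed: B drops A's incrementally maintained even-sum accumulator entirely: it just applies each increment and rescans the whole array to recompute the even sum per query.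
import Mathlib
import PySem

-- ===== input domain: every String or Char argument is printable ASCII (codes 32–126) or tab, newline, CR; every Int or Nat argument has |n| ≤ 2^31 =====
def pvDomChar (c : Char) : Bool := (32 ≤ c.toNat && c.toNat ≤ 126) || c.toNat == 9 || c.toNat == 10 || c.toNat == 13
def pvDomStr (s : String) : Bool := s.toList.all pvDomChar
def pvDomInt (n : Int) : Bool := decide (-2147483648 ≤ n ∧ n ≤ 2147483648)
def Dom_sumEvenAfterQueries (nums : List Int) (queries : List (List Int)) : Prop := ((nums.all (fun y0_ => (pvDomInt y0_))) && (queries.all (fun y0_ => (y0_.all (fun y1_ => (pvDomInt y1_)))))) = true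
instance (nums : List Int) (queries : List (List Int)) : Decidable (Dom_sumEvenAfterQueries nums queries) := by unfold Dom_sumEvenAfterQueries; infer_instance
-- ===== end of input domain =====

-- B drops A's running even-sum accumulator and rescans the array after each update; both A and B
-- mutate the Python argument `nums` in place identically, the equivalence proved is about the return value.

-- ===== PORT A =====
-- A's query loop: carries the running even sum, adjusting it before/after the in-place update.
def pvGoA : List (List Int) → List Int → Int → List Int
  | [], _, _ => []
  | q :: rest, nums, evenSum =>
      let value := PySem.List.pyGetD q 0 0
      let index := PySem.List.pyGetD q 1 0
      let cur := PySem.List.pyGetD nums index 0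
      let es1 := if cur % 2 = 0 then evenSum - cur else evenSum
      let nv := cur + value
      let nums' := PySem.List.pySetD nums index nv
      let es2 := if nv % 2 = 0 then es1 + nv else es1
      es2 :: pvGoA rest nums' es2

def sumEvenAfterQueries (nums : List Int) (queries : List (List Int)) : List Int :=
  pvGoA queries nums ((nums.filter (fun item => item % 2 == 0)).sum)

-- ===== PORT B =====
-- B's per-query full rescan: sum(x for x in nums if x % 2 == 0)
def pvRescanEvenSum (xs : List Int) : Int := (xs.filter (fun x => x % 2 == 0)).sum

def pvGoB : List (List Int) → List Int → List Int
  | [], _ => []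
  | q :: rest, nums =>
      let index := PySem.List.pyGetD q 1 0
      let nums' := PySem.List.pySetD nums index (PySem.List.pyGetD nums index 0 + PySem.List.pyGetD q 0 0)
      pvRescanEvenSum nums' :: pvGoB rest nums'

def sumEvenAfterQueries_alt (nums : List Int) (queries : List (List Int)) : List Int :=
  pvGoB queries nums

-- ===== PRECONDITION & SPEC =====
-- Pre_ excludes exactly the inputs on which the Python raises: a query whose length is not 2
-- (ValueError on unpacking) or whose index is out of range for nums (IndexError).
def Pre_sumEvenAfterQueries (nums : List Int) (queries : List (List Int)) : Prop :=
  ∀ q ∈ queries, q.length = 2 ∧ PySem.Raise.InRange nums.length (PySem.List.pyGetD q 1 0)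
instance (nums : List Int) (queries : List (List Int)) : Decidable (Pre_sumEvenAfterQueries nums queries) := by unfold Pre_sumEvenAfterQueries; infer_instance

def pvWitness_sumEvenAfterQueries : List Int × List (List Int) := ([1, 2, 3, 4], [[1, 0], [-3, 1], [-4, 0], [2, 3]])

def Spec_sumEvenAfterQueries (nums : List Int) (queries : List (List Int)) (out : List Int) : Prop := out = sumEvenAfterQueries_alt nums queries
instance (nums : List Int) (queries : List (List Int)) (out : List Int) : Decidable (Spec_sumEvenAfterQueries nums queries out) := by unfold Spec_sumEvenAfterQueries; infer_instance

-- ===== CLAIM (what is proved, stated in full; the proofs are below) =====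
def Claim_equal_sumEvenAfterQueries : Prop := ∀ (nums : List Int) (queries : List (List Int)), Dom_sumEvenAfterQueries nums queries → Pre_sumEvenAfterQueries nums queries → Spec_sumEvenAfterQueries nums queries (sumEvenAfterQueries nums queries)

-- ===== LEMMAS AND PROOFS =====

-- Any in-range Python index resolves to one Nat position j for both read and write.
theorem pv_index_bridge (xs : List Int) (i v d : Int) (h : PySem.Raise.InRange xs.length i) :
    ∃ j : Nat, j < xs.length ∧ PySem.List.pyGetD xs i d = xs.getD j d ∧
      PySem.List.pySetD xs i v = xs.set j v := by
  by_cases hp : 0 ≤ i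
  · refine ⟨i.toNat, ?_, ?_, ?_⟩
    · simp only [PySem.Raise.InRange] at h; omega
    · rw [PySem.List.pyGetD_of_nonneg _ _ hp]
    · exact PySem.List.pySetD_of_nonneg _ _ hp
  · have hn : i < 0 := by omega
    refine ⟨(i + xs.length).toNat, ?_, ?_, ?_⟩
    · simp only [PySem.Raise.InRange] at h; omega
    · simp only [PySem.List.pyGetD, PySem.List.pyGet?, PySem.List.pyIdx?, PySem.Raise.InRange] at *
      have he : xs.length - (-i).toNat = (i + xs.length).toNat := by omega
      split_ifs with h1 <;> simp_all [List.getD]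
    · simp only [PySem.List.pySetD, PySem.List.pySet?, PySem.List.pyIdx?, PySem.Raise.InRange] at *
      have he : xs.length - (-i).toNat = (i + xs.length).toNat := by omega
      split_ifs with h1 <;> simp_all

-- Writing position j changes the even-sum by removing the old value's even contribution and adding the new one's.
theorem pv_evensum_set (xs : List Int) (j : Nat) (v : Int) (hj : j < xs.length) :
    ((xs.set j v).filter (fun x => x % 2 == 0)).sum =
      (xs.filter (fun x => x % 2 == 0)).sum
        - (if xs.getD j 0 % 2 = 0 then xs.getD j 0 else 0)
        + (if v % 2 = 0 then v else 0) := by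
  induction xs generalizing j with
  | nil => simp at hj
  | cons x xs ih =>
      cases j with
      | zero =>
          simp only [List.set, List.getD_cons_zero, List.filter_cons]
          split_ifs with h1 h2 h2 <;> simp_all <;> ring
      | succ j =>
          have hj' : j < xs.length := by simpa using hj
          have hih := ih j hj'
          simp only [List.set, List.getD_cons_succ, List.filter_cons]
          by_cases hx : (x % 2 == 0) = true <;>
            simp only [hx, if_true, if_false, Bool.false_eq_true, List.sum_cons, hih] <;>
            split_ifs <;> ring

theorem pv_go_eq (queries : List (List Int)) : ∀ (nums : List Int),
    (∀ q ∈ queries, PySem.Raise.InRange nums.length (PySem.List.pyGetD q 1 0)) →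
    pvGoA queries nums ((nums.filter (fun x => x % 2 == 0)).sum) = pvGoB queries nums := by
  induction queries with
  | nil => intro nums _; rfl
  | cons q rest ih =>
      intro nums hpre
      have hq := hpre q (by simp)
      obtain ⟨j, hj, hget, hset⟩ := pv_index_bridge nums (PySem.List.pyGetD q 1 0)
        (PySem.List.pyGetD nums (PySem.List.pyGetD q 1 0) 0 + PySem.List.pyGetD q 0 0) 0 hq
      rw [hget] at hset
      simp only [pvGoA, pvGoB, pvRescanEvenSum, hget, hset]
      have hlen : (nums.set j (nums.getD j 0 + PySem.List.pyGetD q 0 0)).length = nums.length := by simp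
      have hsum := pv_evensum_set nums j (nums.getD j 0 + PySem.List.pyGetD q 0 0) hj
      have hrest := ih (nums.set j (nums.getD j 0 + PySem.List.pyGetD q 0 0))
        (fun q' hq' => by rw [hlen]; exact hpre q' (List.mem_cons_of_mem _ hq'))
      rw [← hrest]
      congr 1
      · rw [hsum]; split_ifs <;> ring
      · rw [hsum]; split_ifs <;> ring

-- ===== VERDICT (by name: the statement is the Claim_ definition above) =====
theorem sumEvenAfterQueries_spec : Claim_equal_sumEvenAfterQueries := by
  intro nums queries _ hpre
  unfold Spec_sumEvenAfterQueries sumEvenAfterQueries sumEvenAfterQueries_alt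
  exact pv_go_eq queries nums (fun q hq => (hpre q hq).2)
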